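-- pv_equiv track=rewrite | github.com/saareliad/FTPipe | main.py | get_my_send_recv_ranks
-- ===== SOURCE A (Python) =====
-- from collections import OrderedDict
--
-- def get_my_send_recv_ranks(config, stage, stage_to_rank_map=None):
--     def ranks_in_stage(given_stage):
--         if stage_to_rank_map:
--             return stage_to_rank_map[given_stage]
--         else:
--             return [given_stage]
--
--     # TODO: We assume this is same order with Alon's code/config, after poped some stuff.
--     # Alon config is outside of the project, this is dangerous programing...
--     receive_ranks = OrderedDict()
--     send_ranks = OrderedDict()
--
--     for i in range(len(config)):
--         for j in range(i + 1, len(config)):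
--             # Update only for this stage...
--             if i != stage and j != stage:
--                 continue
--
--             stage_i = config[i]
--             stage_j = config[j]
--             for tensor_name in stage_i['outputs']:
--                 if tensor_name in stage_j['inputs']:
--                     if stage == j:
--                         receive_ranks[tensor_name] = ranks_in_stage(i)
--                     else:
--                         send_ranks[tensor_name] = ranks_in_stage(j)
--
--     return send_ranks, receive_ranks
-- ===== SOURCE B (Python) =====
-- def get_my_send_recv_ranks(config, stage, stage_to_rank_map=None):
--     def ranks_in_stage(given_stage):
--         return stage_to_rank_map[given_stage] if stage_to_rank_map else [given_stage]
--
--     send_ranks, receive_ranks = {}, {}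
--     if 0 <= stage < len(config):
--         my = config[stage]
--         # receives: only pairs (i, stage) with i < stage can ever update receive_ranks
--         for i in range(stage):
--             for tensor_name in config[i]['outputs']:
--                 if tensor_name in my['inputs']:
--                     receive_ranks[tensor_name] = ranks_in_stage(i)
--         # sends: only pairs (stage, j) with j > stage can ever update send_ranks
--         for j in range(stage + 1, len(config)):
--             for tensor_name in my['outputs']:
--                 if tensor_name in config[j]['inputs']:
--                     send_ranks[tensor_name] = ranks_in_stage(j)
--     return send_ranks, receive_ranks
-- ===== Notes on version B (the rewrite author's own statement) =====
-- stated objective: alternative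
-- what changed: B iterates only the O(n) index pairs that involve `stage` (i < stage filling receive_ranks, then j > stage filling send_ranks) instead of A's double loop over all O(n^2) pairs with a skip-guard; when stage is out of range B skips the scan entirely. The asymptotic saving is in the number of stages, which the timing inputs do not grow, so no speed is claimed.
import Mathlib
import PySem

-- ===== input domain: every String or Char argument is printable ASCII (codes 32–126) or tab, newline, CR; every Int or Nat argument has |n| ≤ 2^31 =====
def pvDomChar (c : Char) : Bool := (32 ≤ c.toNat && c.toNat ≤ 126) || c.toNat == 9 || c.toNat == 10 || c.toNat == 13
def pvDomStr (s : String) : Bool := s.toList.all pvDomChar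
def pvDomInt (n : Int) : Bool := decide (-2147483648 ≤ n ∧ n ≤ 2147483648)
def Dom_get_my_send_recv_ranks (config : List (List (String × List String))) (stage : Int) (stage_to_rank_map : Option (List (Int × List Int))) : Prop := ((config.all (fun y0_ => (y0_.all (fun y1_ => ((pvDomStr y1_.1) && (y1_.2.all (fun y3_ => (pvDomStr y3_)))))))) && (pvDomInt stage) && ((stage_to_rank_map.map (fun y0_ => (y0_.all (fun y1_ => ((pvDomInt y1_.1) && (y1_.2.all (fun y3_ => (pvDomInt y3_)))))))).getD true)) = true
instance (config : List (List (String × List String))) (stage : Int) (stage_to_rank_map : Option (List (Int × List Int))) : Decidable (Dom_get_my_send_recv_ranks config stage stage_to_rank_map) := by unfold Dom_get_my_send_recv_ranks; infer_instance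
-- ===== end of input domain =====

-- B iterates only the O(n) pairs that involve `stage` (i < stage for receives, j > stage for sends)
-- instead of A's scan over all O(n^2) index pairs; same return value wherever the Python A returns.

-- ===== PORT A =====
-- ranks_in_stage: `if stage_to_rank_map:` is Python truthiness (None and {} falsy);
-- the dict lookup stage_to_rank_map[g] raises KeyError when g is absent — Pre_ excludes that,
-- so the `.getD [] ` default is never reached on admitted inputs.
def pyRanksA (m : Option (List (Int × List Int))) (g : Int) : List Int :=
  match m with
  | some mm => if mm.isEmpty then [g] else (PySem.Dict.mk mm).getD g []
  | none => [g]

-- Literal transliteration of A: double loop over all pairs i < j, skipping pairs not touching `stage`.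
-- config[i]['outputs'] / ['inputs'] raise KeyError when absent — excluded by Pre_, default [] unreachable there.
def get_my_send_recv_ranks (config : List (List (String × List String))) (stage : Int) (stage_to_rank_map : Option (List (Int × List Int))) : (List (String × List Int)) × (List (String × List Int)) :=
  let n : Int := config.length
  let st :=
    (PySem.List.pyRange 0 n 1).foldl (fun st i =>
      (PySem.List.pyRange (i + 1) n 1).foldl (fun st j =>
        if i ≠ stage ∧ j ≠ stage then st
        else
          let stage_i := PySem.Dict.mk ((PySem.List.pyGet? config i).getD [])
          let stage_j := PySem.Dict.mk ((PySem.List.pyGet? config j).getD [])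
          (stage_i.getD "outputs" []).foldl (fun st t =>
            if (stage_j.getD "inputs" []).contains t then
              if stage = j then (st.1.insert t (pyRanksA stage_to_rank_map i), st.2)
              else (st.1, st.2.insert t (pyRanksA stage_to_rank_map j))
            else st) st) st)
      ((PySem.Dict.empty : PySem.Dict String (List Int)), (PySem.Dict.empty : PySem.Dict String (List Int)))
  (st.2.items, st.1.items)

-- ===== PORT B =====
def pyRanksB (m : Option (List (Int × List Int))) (g : Int) : List Int :=
  match m with
  | some mm => if mm.isEmpty then [g] else (PySem.Dict.mk mm).getD g []
  | none => [g]

-- Literal transliteration of B: only the O(n) relevant pairs, receives then sends.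
def get_my_send_recv_ranks_alt (config : List (List (String × List String))) (stage : Int) (stage_to_rank_map : Option (List (Int × List Int))) : (List (String × List Int)) × (List (String × List Int)) :=
  if 0 ≤ stage ∧ stage < (config.length : Int) then
    let my := PySem.Dict.mk ((PySem.List.pyGet? config stage).getD [])
    let recv := (PySem.List.pyRange 0 stage 1).foldl (fun d i =>
        ((PySem.Dict.mk ((PySem.List.pyGet? config i).getD [])).getD "outputs" []).foldl (fun d t =>
          if (my.getD "inputs" []).contains t then d.insert t (pyRanksB stage_to_rank_map i) else d) d)
      (PySem.Dict.empty : PySem.Dict String (List Int))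
    let send := (PySem.List.pyRange (stage + 1) (config.length : Int) 1).foldl (fun d j =>
        (my.getD "outputs" []).foldl (fun d t =>
          if ((PySem.Dict.mk ((PySem.List.pyGet? config j).getD [])).getD "inputs" []).contains t then d.insert t (pyRanksB stage_to_rank_map j) else d) d)
      (PySem.Dict.empty : PySem.Dict String (List Int))
    (send.items, recv.items)
  else ([], [])

-- ===== PRECONDITION & SPEC =====
def pvHasKey (b : List (String × List String)) (k : String) : Bool := (b.map Prod.fst).contains k
def pvGetKey (b : List (String × List String)) (k : String) : List String := (PySem.Dict.mk b).getD k []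
def pvBlk (config : List (List (String × List String))) (i : Nat) : List (String × List String) := config.getD i []
def pvTruthy (m : Option (List (Int × List Int))) : Bool := match m with | some mm => !mm.isEmpty | none => false
def pvMKeys (m : Option (List (Int × List Int))) : List Int := (m.getD []).map Prod.fst

-- Pre_ = exactly the inputs where the Python A returns normally: every dict key access A performs
-- ('outputs'/'inputs' of the blocks it touches, and stage_to_rank_map[k] when a tensor matches) succeeds.
-- pvRecvOk: the accesses of pair (i, stage) all succeed; pvSendOk: those of pair (stage, j).
def pvRecvOk (config : List (List (String × List String))) (s i : Nat) (m : Option (List (Int × List Int))) : Bool :=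
  pvHasKey (pvBlk config i) "outputs" &&
  ((pvGetKey (pvBlk config i) "outputs").isEmpty || pvHasKey (pvBlk config s) "inputs") &&
  (!pvTruthy m || !((pvGetKey (pvBlk config i) "outputs").any (fun t => (pvGetKey (pvBlk config s) "inputs").contains t)) || (pvMKeys m).contains (i : Int))

def pvSendOk (config : List (List (String × List String))) (s j : Nat) (m : Option (List (Int × List Int))) : Bool :=
  ((pvGetKey (pvBlk config s) "outputs").isEmpty || pvHasKey (pvBlk config j) "inputs") &&
  (!pvTruthy m || !((pvGetKey (pvBlk config s) "outputs").any (fun t => (pvGetKey (pvBlk config j) "inputs").contains t)) || (pvMKeys m).contains (j : Int))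

def Pre_get_my_send_recv_ranks (config : List (List (String × List String))) (stage : Int) (stage_to_rank_map : Option (List (Int × List Int))) : Prop :=
  0 ≤ stage → stage < (config.length : Int) →
    ((∀ i < stage.toNat, pvRecvOk config stage.toNat i stage_to_rank_map = true) ∧
     (stage.toNat + 1 < config.length →
        pvHasKey (pvBlk config stage.toNat) "outputs" = true ∧
        ∀ j < config.length, stage.toNat < j → pvSendOk config stage.toNat j stage_to_rank_map = true))
instance (config : List (List (String × List String))) (stage : Int) (stage_to_rank_map : Option (List (Int × List Int))) : Decidable (Pre_get_my_send_recv_ranks config stage stage_to_rank_map) := by unfold Pre_get_my_send_recv_ranks; infer_instance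

def pvWitness_get_my_send_recv_ranks : (List (List (String × List String))) × Int × (Option (List (Int × List Int))) :=
  ([[("outputs", ["a"]), ("inputs", [])], [("inputs", ["a"]), ("outputs", [])]], 1, none)

def Spec_get_my_send_recv_ranks (config : List (List (String × List String))) (stage : Int) (stage_to_rank_map : Option (List (Int × List Int))) (out : (List (String × List Int)) × (List (String × List Int))) : Prop := out = get_my_send_recv_ranks_alt config stage stage_to_rank_map
instance (config : List (List (String × List String))) (stage : Int) (stage_to_rank_map : Option (List (Int × List Int))) (out : (List (String × List Int)) × (List (String × List Int))) : Decidable (Spec_get_my_send_recv_ranks config stage stage_to_rank_map out) := by unfold Spec_get_my_send_recv_ranks; infer_instance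

-- ===== CLAIM (what is proved, stated in full; the proofs are below) =====
def Claim_equal_get_my_send_recv_ranks : Prop := ∀ (config : List (List (String × List String))) (stage : Int) (stage_to_rank_map : Option (List (Int × List Int))), Dom_get_my_send_recv_ranks config stage stage_to_rank_map → Pre_get_my_send_recv_ranks config stage stage_to_rank_map → Spec_get_my_send_recv_ranks config stage stage_to_rank_map (get_my_send_recv_ranks config stage stage_to_rank_map)

-- ===== LEMMAS AND PROOFS =====

-- named forms of the fold bodies of the two ports (proof-only helpers)
def pairStep (config : List (List (String × List String))) (stage : Int) (m : Option (List (Int × List Int))) (st : PySem.Dict String (List Int) × PySem.Dict String (List Int)) (i j : Int) : PySem.Dict String (List Int) × PySem.Dict String (List Int) :=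
  if i ≠ stage ∧ j ≠ stage then st
  else
    let stage_i := PySem.Dict.mk ((PySem.List.pyGet? config i).getD [])
    let stage_j := PySem.Dict.mk ((PySem.List.pyGet? config j).getD [])
    (stage_i.getD "outputs" []).foldl (fun st t =>
      if (stage_j.getD "inputs" []).contains t then
        if stage = j then (st.1.insert t (pyRanksA m i), st.2)
        else (st.1, st.2.insert t (pyRanksA m j))
      else st) st

def recvStep (config : List (List (String × List String))) (stage : Int) (m : Option (List (Int × List Int))) (d : PySem.Dict String (List Int)) (i : Int) : PySem.Dict String (List Int) :=
  ((PySem.Dict.mk ((PySem.List.pyGet? config i).getD [])).getD "outputs" []).foldl (fun d t =>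
    if ((PySem.Dict.mk ((PySem.List.pyGet? config stage).getD [])).getD "inputs" []).contains t then d.insert t (pyRanksA m i) else d) d

def sendStep (config : List (List (String × List String))) (stage : Int) (m : Option (List (Int × List Int))) (d : PySem.Dict String (List Int)) (j : Int) : PySem.Dict String (List Int) :=
  ((PySem.Dict.mk ((PySem.List.pyGet? config stage).getD [])).getD "outputs" []).foldl (fun d t =>
    if ((PySem.Dict.mk ((PySem.List.pyGet? config j).getD [])).getD "inputs" []).contains t then d.insert t (pyRanksA m j) else d) d

theorem portA_eq (config : List (List (String × List String))) (stage : Int) (m : Option (List (Int × List Int))) :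
    get_my_send_recv_ranks config stage m =
      (let st := (PySem.List.pyRange 0 (config.length : Int) 1).foldl
          (fun st i => (PySem.List.pyRange (i + 1) (config.length : Int) 1).foldl
            (fun st j => pairStep config stage m st i j) st)
          (PySem.Dict.empty, PySem.Dict.empty)
       (st.2.items, st.1.items)) := rfl

theorem portB_eq (config : List (List (String × List String))) (stage : Int) (m : Option (List (Int × List Int))) :
    get_my_send_recv_ranks_alt config stage m =
      (if 0 ≤ stage ∧ stage < (config.length : Int) then
        (((PySem.List.pyRange (stage + 1) (config.length : Int) 1).foldl (sendStep config stage m) PySem.Dict.empty).items,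
         ((PySem.List.pyRange 0 stage 1).foldl (recvStep config stage m) PySem.Dict.empty).items)
      else ([], [])) := rfl

theorem foldl_fst_only {α β γ : Type} (l : List α) (c : α → Bool) (f : β → α → β) (st : β × γ) :
    l.foldl (fun st t => if c t then (f st.1 t, st.2) else st) st =
      (l.foldl (fun d t => if c t then f d t else d) st.1, st.2) := by
  induction l generalizing st with
  | nil => rfl
  | cons h tl ih =>
    by_cases hc : c h = true <;> simp [List.foldl_cons, hc, ih]

theorem foldl_snd_only {α β γ : Type} (l : List α) (c : α → Bool) (f : γ → α → γ) (st : β × γ) :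
    l.foldl (fun st t => if c t then (st.1, f st.2 t) else st) st =
      (st.1, l.foldl (fun d t => if c t then f d t else d) st.2) := by
  induction l generalizing st with
  | nil => rfl
  | cons h tl ih =>
    by_cases hc : c h = true <;> simp [List.foldl_cons, hc, ih]

theorem pairStep_skip (config : List (List (String × List String))) (stage : Int) (m : Option (List (Int × List Int))) (st : PySem.Dict String (List Int) × PySem.Dict String (List Int)) {i j : Int} (hi : i ≠ stage) (hj : j ≠ stage) :
    pairStep config stage m st i j = st := by
  simp [pairStep, hi, hj]

theorem pairStep_recv (config : List (List (String × List String))) (stage : Int) (m : Option (List (Int × List Int))) (st : PySem.Dict String (List Int) × PySem.Dict String (List Int)) {i : Int} :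
    pairStep config stage m st i stage = (recvStep config stage m st.1 i, st.2) := by
  simp only [pairStep, recvStep]
  rw [if_neg (by simp)]
  simp only [if_true]
  exact foldl_fst_only _ (fun t => ((PySem.Dict.mk ((PySem.List.pyGet? config stage).getD [])).getD "inputs" []).contains t) (fun d t => d.insert t (pyRanksA m i)) st

theorem pairStep_send (config : List (List (String × List String))) (stage : Int) (m : Option (List (Int × List Int))) (st : PySem.Dict String (List Int) × PySem.Dict String (List Int)) {j : Int} (hj : j ≠ stage) :
    pairStep config stage m st stage j = (st.1, sendStep config stage m st.2 j) := by
  simp only [pairStep, sendStep]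
  rw [if_neg (by simp)]
  simp only [if_neg (show ¬ stage = j from fun h => hj h.symm)]
  exact foldl_snd_only _ (fun t => ((PySem.Dict.mk ((PySem.List.pyGet? config j).getD [])).getD "inputs" []).contains t) (fun d t => d.insert t (pyRanksA m j)) st

theorem inner_gt (config : List (List (String × List String))) (stage : Int) (m : Option (List (Int × List Int))) (st : PySem.Dict String (List Int) × PySem.Dict String (List Int)) {i : Int} (hi : stage < i) :
    (PySem.List.pyRange (i + 1) (config.length : Int) 1).foldl (fun st j => pairStep config stage m st i j) st = st := by
  rw [PySem.List.foldl_congr_mem _ _ (fun st (_ : Int) => st) st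
      (fun acc j hj => pairStep_skip config stage m acc (by omega)
        (by have hj' := PySem.List.mem_pyRange_one.1 hj; omega)),
    PySem.List.foldl_ignore]

theorem inner_lt (config : List (List (String × List String))) (stage : Int) (m : Option (List (Int × List Int))) (st : PySem.Dict String (List Int) × PySem.Dict String (List Int)) {i : Int} (h1 : stage < (config.length : Int)) (hi : i < stage) :
    (PySem.List.pyRange (i + 1) (config.length : Int) 1).foldl (fun st j => pairStep config stage m st i j) st = (recvStep config stage m st.1 i, st.2) := by
  rw [PySem.List.pyRange_one_append (i + 1) stage (config.length : Int) (by omega) (by omega),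
    PySem.List.pyRange_one_cons h1, List.foldl_append, List.foldl_cons]
  rw [PySem.List.foldl_congr_mem _ _ (fun st (_ : Int) => st) st
      (fun acc j hj => pairStep_skip config stage m acc (by omega)
        (by have hj' := PySem.List.mem_pyRange_one.1 hj; omega)),
    PySem.List.foldl_ignore]
  rw [pairStep_recv config stage m st]
  rw [PySem.List.foldl_congr_mem _ _ (fun st (_ : Int) => st) _
      (fun acc j hj => pairStep_skip config stage m acc (by omega)
        (by have hj' := PySem.List.mem_pyRange_one.1 hj; omega)),
    PySem.List.foldl_ignore]

theorem inner_eq (config : List (List (String × List String))) (stage : Int) (m : Option (List (Int × List Int))) (st : PySem.Dict String (List Int) × PySem.Dict String (List Int)) :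
    (PySem.List.pyRange (stage + 1) (config.length : Int) 1).foldl (fun st j => pairStep config stage m st stage j) st =
      (st.1, (PySem.List.pyRange (stage + 1) (config.length : Int) 1).foldl (sendStep config stage m) st.2) := by
  rw [PySem.List.foldl_congr_mem _ _ (fun st j => (st.1, sendStep config stage m st.2 j)) st
      (fun acc j hj => pairStep_send config stage m acc
        (by have hj' := PySem.List.mem_pyRange_one.1 hj; omega))]
  obtain ⟨a, b⟩ := st
  rw [PySem.List.foldl_prod_mk (f := fun (s : PySem.Dict String (List Int)) (_ : Int) => s) (g := sendStep config stage m),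
    PySem.List.foldl_ignore]

theorem ports_agree (config : List (List (String × List String))) (stage : Int) (m : Option (List (Int × List Int))) :
    get_my_send_recv_ranks config stage m = get_my_send_recv_ranks_alt config stage m := by
  rw [portA_eq, portB_eq]
  by_cases h : 0 ≤ stage ∧ stage < (config.length : Int)
  · rw [if_pos h]
    obtain ⟨h0, h1⟩ := h
    rw [PySem.List.pyRange_one_append 0 stage (config.length : Int) h0 (le_of_lt h1),
      PySem.List.pyRange_one_cons h1, List.foldl_append, List.foldl_cons]
    rw [PySem.List.foldl_congr_mem _ _ (fun st i => (recvStep config stage m st.1 i, st.2)) _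
        (fun acc i hi => inner_lt config stage m acc h1 (PySem.List.mem_pyRange_one.1 hi).2)]
    rw [PySem.List.foldl_prod_mk (f := recvStep config stage m) (g := fun (s : PySem.Dict String (List Int)) (_ : Int) => s),
      PySem.List.foldl_ignore]
    rw [inner_eq config stage m]
    rw [PySem.List.foldl_congr_mem _ _ (fun st (_ : Int) => st) _
        (fun acc i hi => inner_gt config stage m acc (PySem.List.mem_pyRange_one.1 hi).1),
      PySem.List.foldl_ignore]
  · rw [if_neg h]
    have hout : stage < 0 ∨ (config.length : Int) ≤ stage := by omega
    rw [PySem.List.foldl_congr_mem _ _ (fun st (_ : Int) => st) _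
        (fun acc i hi => by
          have hi' := PySem.List.mem_pyRange_one.1 hi
          exact (PySem.List.foldl_congr_mem _ _ (fun st (_ : Int) => st) acc
              (fun acc2 j hj => pairStep_skip config stage m acc2 (by omega)
                (by have hj' := PySem.List.mem_pyRange_one.1 hj; omega))).trans
            (PySem.List.foldl_ignore _ acc)),
      PySem.List.foldl_ignore]
    rfl

-- ===== VERDICT (by name: the statement is the Claim_ definition above) =====
theorem get_my_send_recv_ranks_spec : Claim_equal_get_my_send_recv_ranks := by
  intro config stage m _ _
  unfold Spec_get_my_send_recv_ranks
  exact ports_agree config stage m
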